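-- pv_equiv track=rewrite | github.com/elkebir-group/MASS | src/algorithms/parse_structures.py | decompose_pseudoknot_structure
-- ===== SOURCE A (Python) =====
-- def decompose_pseudoknot_structure(dotbr):
--     """
--     Decompose a pseudoknotted structure into multiple pseudoknot-free substructures.
--
--     Args:
--         dotbr: Dot-bracket structure string (e.g., "((..[[..))..]]")
--
--     Returns:
--         List of tuples: [(substructure_string, bracket_type), ...]
--         where bracket_type is '()', '[]', '{}', etc.
--     """
--     # Find all bracket types present
--     bracket_types = set()
--     for char in dotbr:
--         if char in '([{':
--             bracket_types.add(char)
--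
--     substructures = []
--
--     for bracket_char in sorted(bracket_types):
--         # Create substructure with only this bracket type and dots
--         substructure = ""
--         closing_char = {'(': ')', '[': ']', '{': '}'}[bracket_char]
--
--         for char in dotbr:
--             if char == bracket_char or char == closing_char or char == '.':
--                 substructure += char
--             else:
--                 substructure += '.'
--
--         # Only add if it contains actual brackets
--         if bracket_char in substructure and closing_char in substructure:
--             substructures.append((substructure, bracket_char + closing_char))
--
--     return substructures
-- ===== SOURCE B (Python) =====
-- def decompose_pseudoknot_structure(dotbr):
--     """Single pass: per-bracket-type buffers filled simultaneously, then emit in fixed '([{' order."""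
--     buf_p, buf_s, buf_c = [], [], []
--     seen = set()
--     for ch in dotbr:
--         seen.add(ch)
--         buf_p.append(ch if ch in '().' else '.')
--         buf_s.append(ch if ch in '[].' else '.')
--         buf_c.append(ch if ch in '{}.' else '.')
--     out = []
--     if '(' in seen and ')' in seen:
--         out.append((''.join(buf_p), '()'))
--     if '[' in seen and ']' in seen:
--         out.append((''.join(buf_s), '[]'))
--     if '{' in seen and '}' in seen:
--         out.append((''.join(buf_c), '{}'))
--     return out
-- ===== Notes on version B (the rewrite author's own statement) =====
-- stated objective: alternative
-- what changed: Replaces A's per-bracket-type rescans of the whole string (build the present-type set, sort it, then one full scan per type) by a single simultaneous pass that fills one buffer per bracket type and records seen characters, emitting the kept types in the fixed '(', '[', '{' order; it trades k rescans for constant per-character work on all three buffers.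
import Mathlib
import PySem

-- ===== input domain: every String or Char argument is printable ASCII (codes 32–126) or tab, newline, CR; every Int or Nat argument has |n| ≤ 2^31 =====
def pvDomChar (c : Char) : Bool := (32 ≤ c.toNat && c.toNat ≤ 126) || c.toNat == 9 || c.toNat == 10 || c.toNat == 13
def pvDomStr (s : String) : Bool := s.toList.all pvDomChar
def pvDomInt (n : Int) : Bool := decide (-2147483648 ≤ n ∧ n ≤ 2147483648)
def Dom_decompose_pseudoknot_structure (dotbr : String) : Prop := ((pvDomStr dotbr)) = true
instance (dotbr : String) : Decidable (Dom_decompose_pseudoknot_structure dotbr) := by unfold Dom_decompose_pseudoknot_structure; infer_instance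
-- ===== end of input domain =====

-- B does one simultaneous pass over the string instead of A's full rescan per bracket type.

-- ===== PORT A =====
def decompose_pseudoknot_structure (dotbr : String) : List (String × String) :=
  let bracket_types : PySem.Set Char :=
    dotbr.toList.foldl (fun s c => if c ∈ ['(', '[', '{'] then PySem.Set.add s c else s)
      PySem.Set.empty
  (PySem.List.sorted bracket_types (fun x => x) false).foldl
    (fun substructures bracket_char =>
      -- {'(': ')', '[': ']', '{': '}'}[bracket_char]; bracket_char is always a key here
      let closing_char := ((PySem.Dict.ofList [('(', ')'), ('[', ']'), ('{', '}')]).get? bracket_char).getD ' '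
      let substructure : List Char := dotbr.toList.foldl
        (fun s c => s ++ [if c = bracket_char ∨ c = closing_char ∨ c = '.' then c else '.']) []
      if bracket_char ∈ substructure ∧ closing_char ∈ substructure then
        substructures ++ [(String.ofList substructure, String.ofList [bracket_char, closing_char])]
      else substructures) []

-- ===== PORT B =====
-- per-type buffer fillers ("ch if ch in '().' else '.'", etc.)
def pvFP (ch : Char) : Char := if ch ∈ ['(', ')', '.'] then ch else '.'
def pvFS (ch : Char) : Char := if ch ∈ ['[', ']', '.'] then ch else '.'
def pvFC (ch : Char) : Char := if ch ∈ ['{', '}', '.'] then ch else '.'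

-- loop body of B's single pass: append to the three buffers and record the char as seen
def pvStep (st : List Char × List Char × List Char × PySem.Set Char) (ch : Char) :
    List Char × List Char × List Char × PySem.Set Char :=
  (st.1 ++ [pvFP ch], st.2.1 ++ [pvFS ch], st.2.2.1 ++ [pvFC ch], PySem.Set.add st.2.2.2 ch)

def decompose_pseudoknot_structure_alt (dotbr : String) : List (String × String) :=
  let st := dotbr.toList.foldl pvStep ([], [], [], PySem.Set.empty)
  (if st.2.2.2.contains '(' && st.2.2.2.contains ')' then [(String.ofList st.1, "()")] else []) ++
  (if st.2.2.2.contains '[' && st.2.2.2.contains ']' then [(String.ofList st.2.1, "[]")] else []) ++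
  (if st.2.2.2.contains '{' && st.2.2.2.contains '}' then [(String.ofList st.2.2.1, "{}")] else [])

-- ===== PRECONDITION & SPEC =====
def Spec_decompose_pseudoknot_structure (dotbr : String) (out : List (String × String)) : Prop := out = decompose_pseudoknot_structure_alt dotbr
instance (dotbr : String) (out : List (String × String)) : Decidable (Spec_decompose_pseudoknot_structure dotbr out) := by unfold Spec_decompose_pseudoknot_structure; infer_instance

-- ===== CLAIM (what is proved, stated in full; the proofs are below) =====
def Claim_equal_decompose_pseudoknot_structure : Prop := ∀ (dotbr : String), Dom_decompose_pseudoknot_structure dotbr → Spec_decompose_pseudoknot_structure dotbr (decompose_pseudoknot_structure dotbr)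

-- ===== LEMMAS AND PROOFS =====

-- B's single pass computes the three mapped buffers and the set of chars seen so far
theorem pv_b_fold (l : List Char) (p s c : List Char) (seen : PySem.Set Char) :
    List.foldl pvStep (p, s, c, seen) l =
      (p ++ l.map pvFP, s ++ l.map pvFS, c ++ l.map pvFC, List.foldl PySem.Set.add seen l) := by
  induction l generalizing p s c seen with
  | nil => simp
  | cons x xs ih => simp [pvStep, ih]

-- A's first loop builds the set of the opening brackets that occur
theorem pv_a_setfold (l : List Char) (s0 : PySem.Set Char) :
    List.foldl (fun s c => if c ∈ ['(', '[', '{'] then PySem.Set.add s c else s) s0 l =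
      List.foldl PySem.Set.add s0 (l.filter (fun c => decide (c ∈ ['(', '[', '{'])))  := by
  induction l generalizing s0 with
  | nil => rfl
  | cons x xs ih =>
      simp only [List.foldl_cons, List.filter_cons]
      by_cases h : x ∈ ['(', '[', '{']
      · rw [if_pos h, if_pos (decide_eq_true h), List.foldl_cons, ih]
      · rw [if_neg h, if_neg (by simpa using h), ih]

-- sorted(set of opening brackets present) is the filter of the ordered literal list
theorem pv_a_sorted (l : List Char) :
    PySem.List.sorted
        (List.foldl PySem.Set.add PySem.Set.empty (l.filter (fun c => decide (c ∈ ['(', '[', '{']))))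
        (fun x => x) false =
      ['(', '[', '{'].filter (fun b => decide (b ∈ l)) := by
  have hofl : List.foldl PySem.Set.add PySem.Set.empty (l.filter (fun c => decide (c ∈ ['(', '[', '{'])))
      = PySem.Set.ofList (l.filter (fun c => decide (c ∈ ['(', '[', '{']))) := rfl
  rw [hofl]
  apply PySem.List.sorted_eq_of_perm_of_pairwise_lt
  · rw [List.perm_ext_iff_of_nodup]
    · intro x
      simp [PySem.Set.mem_ofList, List.mem_filter]
      tauto
    · exact List.Nodup.filter _ (by decide)
    · exact PySem.Set.nodup_ofList _
  · exact List.Pairwise.filter _ (by decide)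

-- membership of a non-dot char in a buffer reduces to membership in the source string
theorem pv_mem_map (b close : Char) (hb : b ≠ '.') (l : List Char) :
    (∃ c ∈ l, (if c = b ∨ c = close ∨ c = '.' then c else '.') = b) ↔ b ∈ l := by
  constructor
  · rintro ⟨c, hcl, hfc⟩
    split at hfc
    · exact hfc ▸ hcl
    · exact absurd hfc.symm hb
  · intro hbl
    exact ⟨b, hbl, by simp⟩

theorem pv_mem_map' (b close : Char) (hc : close ≠ '.') (l : List Char) :
    (∃ c ∈ l, (if c = b ∨ c = close ∨ c = '.' then c else '.') = close) ↔ close ∈ l := by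
  constructor
  · rintro ⟨c, hcl, hfc⟩
    split at hfc
    · exact hfc ▸ hcl
    · exact absurd hfc.symm hc
  · intro hbl
    exact ⟨close, hbl, by simp⟩

-- flatten of singleton pieces is a map
theorem pv_flat (f : Char → Char) (l : List Char) : (l.map (fun x => [f x])).flatten = l.map f := by
  induction l <;> simp_all

-- A's inner-loop selector equals B's buffer filler, for each of the three types
theorem pv_mapP (l : List Char) :
    l.map (fun x => if x = '(' ∨ x = ')' ∨ x = '.' then x else '.') = l.map pvFP := by
  apply List.map_congr_left; intro c _; simp [pvFP]
theorem pv_mapS (l : List Char) :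
    l.map (fun x => if x = '[' ∨ x = ']' ∨ x = '.' then x else '.') = l.map pvFS := by
  apply List.map_congr_left; intro c _; simp [pvFS]
theorem pv_mapC (l : List Char) :
    l.map (fun x => if x = '{' ∨ x = '}' ∨ x = '.' then x else '.') = l.map pvFC := by
  apply List.map_congr_left; intro c _; simp [pvFC]

-- the dict lookup of the closing bracket, evaluated at the three keys
theorem pv_close_p : ((PySem.Dict.ofList [('(', ')'), ('[', ']'), ('{', '}')]).get? '(').getD ' ' = ')' := by decide
theorem pv_close_s : ((PySem.Dict.ofList [('(', ')'), ('[', ']'), ('{', '}')]).get? '[').getD ' ' = ']' := by decide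
theorem pv_close_c : ((PySem.Dict.ofList [('(', ')'), ('[', ']'), ('{', '}')]).get? '{').getD ' ' = '}' := by decide

-- Set.contains on the accumulated seen-set is membership in the string
theorem pv_contains (l : List Char) (x : Char) :
    (List.foldl PySem.Set.add PySem.Set.empty l).contains x = decide (x ∈ l) := by
  have h : List.foldl PySem.Set.add PySem.Set.empty l = PySem.Set.ofList l := rfl
  rw [h]
  by_cases hx : x ∈ l <;> simp [PySem.Set.contains, hx, PySem.Set.mem_ofList]

-- ===== VERDICT (by name: the statement is the Claim_ definition above) =====
theorem decompose_pseudoknot_structure_spec : Claim_equal_decompose_pseudoknot_structure := by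
  intro dotbr _
  unfold Spec_decompose_pseudoknot_structure
  unfold decompose_pseudoknot_structure decompose_pseudoknot_structure_alt
  set l := dotbr.toList with hl
  simp only [pv_a_setfold, pv_a_sorted, pv_b_fold]
  simp only [List.nil_append, pv_contains]
  by_cases h1 : '(' ∈ l <;> by_cases h2 : '[' ∈ l <;> by_cases h3 : '{' ∈ l <;>
    by_cases g1 : ')' ∈ l <;> by_cases g2 : ']' ∈ l <;> by_cases g3 : '}' ∈ l <;>
    simp [h1, h2, h3, g1, g2, g3, List.filter,
      pv_mem_map _ _ (by decide : ('(' : Char) ≠ '.'),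
      pv_mem_map _ _ (by decide : ('[' : Char) ≠ '.'),
      pv_mem_map _ _ (by decide : ('{' : Char) ≠ '.'),
      pv_mem_map' _ _ (by decide : (')' : Char) ≠ '.'),
      pv_mem_map' _ _ (by decide : (']' : Char) ≠ '.'),
      pv_mem_map' _ _ (by decide : ('}' : Char) ≠ '.'),
      pv_flat, pv_mapP, pv_mapS, pv_mapC, pv_close_p, pv_close_s, pv_close_c]
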